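-- pv_equiv track=rewrite | github.com/Kairobo/Learn_Python | transfer_points.py | vector_add
-- ===== SOURCE A (Python) =====
-- def vector_add(add_list):
--
--     vec_new = [0,0]
--     if len(add_list) == 0:
--         return vec_new
--     for i in range(len(add_list)):
--         vec_new[0] = vec_new[0] + add_list[i][0]
--         vec_new[1] = vec_new[1] + add_list[i][1]
--     return vec_new
-- ===== SOURCE B (Python) =====
-- def vector_add(add_list):
--     n = len(add_list)
--     if n == 0:
--         return [0, 0]
--     if n == 1:
--         return [add_list[0][0], add_list[0][1]]
--     mid = n // 2
--     a = vector_add(add_list[:mid])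
--     b = vector_add(add_list[mid:])
--     return [a[0] + b[0], a[1] + b[1]]
-- ===== Notes on version B (the rewrite author's own statement) =====
-- stated objective: alternative
-- what changed: Replaces A's single indexed loop over a mutable [x,y] accumulator with a divide-and-conquer recursion: split the list in half, recursively sum each half, and combine the two partial vectors.
import Mathlib
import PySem

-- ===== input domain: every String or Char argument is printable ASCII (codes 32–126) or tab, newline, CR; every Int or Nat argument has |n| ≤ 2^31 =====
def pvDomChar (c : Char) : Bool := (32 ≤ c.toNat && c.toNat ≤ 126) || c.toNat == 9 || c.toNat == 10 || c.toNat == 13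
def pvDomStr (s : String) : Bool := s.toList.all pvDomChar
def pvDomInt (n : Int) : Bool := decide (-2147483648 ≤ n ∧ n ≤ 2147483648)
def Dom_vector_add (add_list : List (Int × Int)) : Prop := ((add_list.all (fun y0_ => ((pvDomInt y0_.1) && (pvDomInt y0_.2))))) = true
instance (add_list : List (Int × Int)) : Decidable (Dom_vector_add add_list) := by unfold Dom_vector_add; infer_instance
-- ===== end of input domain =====

-- B replaces A's indexed loop over a mutable [x,y] accumulator with a divide-and-conquer
-- recursion (split in half, recurse, combine the two partial vectors); objective: alternative.
-- ===== PORT A =====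
-- literal port of A: vec_new = [0,0]; early return on empty; loop i over range(len) updating both slots (indices always in range, so getD is exact)
def vector_add (add_list : List (Int × Int)) : List Int :=
  let vec_new : List Int := [0, 0]
  if add_list.length == 0 then vec_new
  else
    (List.range add_list.length).foldl
      (fun v i => [v.getD 0 0 + (add_list.getD i (0, 0)).1,
                   v.getD 1 0 + (add_list.getD i (0, 0)).2]) vec_new

-- ===== PORT B =====
-- port of B: divide and conquer; slices l[:mid] / l[mid:] are take/drop (mid in range)
def vector_add_alt (add_list : List (Int × Int)) : List Int :=
  match add_list with
  | [] => [0, 0]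
  | [p] => [p.1, p.2]
  | p :: q :: rest =>
    let l := p :: q :: rest
    let mid := l.length / 2
    let a := vector_add_alt (l.take mid)
    let b := vector_add_alt (l.drop mid)
    [a.getD 0 0 + b.getD 0 0, a.getD 1 0 + b.getD 1 0]
termination_by add_list.length
decreasing_by
  · simp_all [List.length_take]; omega
  · simp_all [List.length_drop]; omega

-- ===== PRECONDITION & SPEC =====
def Spec_vector_add (add_list : List (Int × Int)) (out : List Int) : Prop := out = vector_add_alt add_list
instance (add_list : List (Int × Int)) (out : List Int) : Decidable (Spec_vector_add add_list out) := by unfold Spec_vector_add; infer_instance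

-- ===== CLAIM (what is proved, stated in full; the proofs are below) =====
def Claim_equal_vector_add : Prop := ∀ (add_list : List (Int × Int)), Dom_vector_add add_list → Spec_vector_add add_list (vector_add add_list)

-- ===== LEMMAS AND PROOFS =====
-- A's fold computes the two column sums
lemma vec_fold (l : List (Int × Int)) :
    (List.range l.length).foldl
      (fun v i => [v.getD 0 0 + (l.getD i (0, 0)).1,
                   v.getD 1 0 + (l.getD i (0, 0)).2]) [0, 0]
    = [(l.map Prod.fst).sum, (l.map Prod.snd).sum] := by
  induction l using List.reverseRecOn with
  | nil => simp
  | append_singleton xs x ih =>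
    rw [List.length_append, List.length_singleton, List.range_succ, List.foldl_append]
    have hcong :
        (List.range xs.length).foldl
          (fun v i => [v.getD 0 0 + ((xs ++ [x]).getD i (0, 0)).1,
                       v.getD 1 0 + ((xs ++ [x]).getD i (0, 0)).2]) [0, 0]
        = (List.range xs.length).foldl
          (fun v i => [v.getD 0 0 + (xs.getD i (0, 0)).1,
                       v.getD 1 0 + (xs.getD i (0, 0)).2]) [0, 0] := by
      apply List.foldl_ext
      intro v i hi
      have hlt : i < xs.length := by simpa using List.mem_range.mp hi
      rw [List.getD_append _ _ _ _ hlt]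
    rw [hcong, ih]
    simp

-- B computes the two column sums as well
lemma alt_eq_sums (l : List (Int × Int)) :
    vector_add_alt l = [(l.map Prod.fst).sum, (l.map Prod.snd).sum] := by
  induction hn : l.length using Nat.strong_induction_on generalizing l with
  | _ n ih =>
    match l with
    | [] => simp [vector_add_alt]
    | [p] => simp [vector_add_alt]
    | p :: q :: rest =>
      rw [vector_add_alt]
      have hlen : rest.length + 2 = n := by simpa using hn
      have htk : ((p :: q :: rest).take ((p :: q :: rest).length / 2)).length < n := by
        simp [List.length_take]; omega
      have hdp : ((p :: q :: rest).drop ((p :: q :: rest).length / 2)).length < n := by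
        simp [List.length_drop]; omega
      rw [ih _ htk _ rfl, ih _ hdp _ rfl]
      have hsplit : ∀ f : (Int × Int) → Int,
          (((p :: q :: rest).take ((p :: q :: rest).length / 2)).map f).sum
          + (((p :: q :: rest).drop ((p :: q :: rest).length / 2)).map f).sum
          = ((p :: q :: rest).map f).sum := by
        intro f
        rw [← List.sum_append, ← List.map_append, List.take_append_drop]
      simp only [List.getD, List.getElem?_cons_zero, List.getElem?_cons_succ,
        Option.getD_some]
      rw [hsplit, hsplit]

-- ===== VERDICT (by name: the statement is the Claim_ definition above) =====
theorem vector_add_spec : Claim_equal_vector_add := by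
  intro l _
  unfold Spec_vector_add vector_add
  rw [alt_eq_sums]
  cases l with
  | nil => simp
  | cons y ys => simpa using vec_fold (y :: ys)
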